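-- pv_equiv track=rewrite | github.com/ghu999/mit6.1010 | recipes/lab.py | combine_recipes
-- ===== SOURCE A (Python) =====
-- def add_recipes(recipe_dicts):
--     """
--     Given a list of recipe dictionaries that map food items to quantities,
--     return a new dictionary that maps each ingredient name
--     to the sum of its quantities across the given recipe dictionaries.
--
--     For example,
--         add_recipes([{'milk':1, 'chocolate':1}, {'sugar':1, 'milk':2}])
--     should return:
--         {'milk':3, 'chocolate': 1, 'sugar': 1}
--     """
--     result = {}
--     for recipe in recipe_dicts:
--         for food in recipe:
--             if food in result:
--                 result[food] += recipe[food]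
--             else:
--                 result[food] = recipe[food]
--     return result
--
-- def combine_recipes(nested_recipes):
--     """
--     Given a list of lists of recipe dictionaries, where each inner list
--     represents all the recipes for a certain ingredient, compute and return a
--     list of recipe dictionaries that represent all the possible combinations of
--     ingredient recipes.
--     """
--     def recur(recipes):
--         if len(recipes) == 0:
--             return []
--         if len(recipes) == 1:
--             return [recipe for recipe in recipes[0]]
--         rest_recipes = recur(recipes[1:])
--         result = []
--         for recipe in recipes[0]:
--             for combo in rest_recipes:
--                 combined = [recipe, combo]
--                 combined = add_recipes(combined)
--                 result.append(combined)
--         return result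
--     return recur(nested_recipes)
-- ===== SOURCE B (Python) =====
-- def _merge(d1, d2):
--     result = dict(d1)
--     for food, qty in d2.items():
--         result[food] = result.get(food, 0) + qty
--     return result
--
-- def combine_recipes(nested_recipes):
--     if not nested_recipes:
--         return []
--     combos = list(nested_recipes[0])
--     for group in nested_recipes[1:]:
--         combos = [_merge(c, d) for c in combos for d in group]
--     return combos
-- ===== Notes on version B (the rewrite author's own statement) =====
-- stated objective: idiomatic
-- what changed: A's right-to-left recursion recur(recipes[1:]) with pairwise add_recipes([recipe, combo]) is replaced by an iterative left-to-right fold over the groups that keeps a running list of combinations and merges each group into it with a small two-dict merge helper; Pre_ only states that each inner association list has distinct keys, which holds for every list encoding a Python dict.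
import Mathlib
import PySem

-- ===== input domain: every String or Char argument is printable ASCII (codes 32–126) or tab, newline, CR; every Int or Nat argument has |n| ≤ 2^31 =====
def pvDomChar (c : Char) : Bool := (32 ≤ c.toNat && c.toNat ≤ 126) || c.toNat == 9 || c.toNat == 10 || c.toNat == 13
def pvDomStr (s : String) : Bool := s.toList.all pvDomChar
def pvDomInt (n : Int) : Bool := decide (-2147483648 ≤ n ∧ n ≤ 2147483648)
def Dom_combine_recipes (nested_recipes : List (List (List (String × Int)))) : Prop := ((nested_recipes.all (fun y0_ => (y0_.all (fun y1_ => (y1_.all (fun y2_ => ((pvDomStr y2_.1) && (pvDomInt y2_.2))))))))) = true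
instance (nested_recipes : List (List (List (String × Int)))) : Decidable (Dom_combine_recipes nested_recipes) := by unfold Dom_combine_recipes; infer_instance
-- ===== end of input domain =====

-- B replaces A's right-to-left recursion (recur on recipes[1:], pairwise add_recipes) by an
-- iterative left-to-right product fold with a two-dict merge helper (objective: idiomatic).

-- ===== PORT A =====
-- 'for food in recipe' iterates the dict's keys; 'recipe[food]' is an exact lookup (food ∈ recipe), ported as getD.
def add_recipes (recipe_dicts : List (List (String × Int))) : List (String × Int) :=
  (recipe_dicts.foldl
    (fun result recipe =>
      (PySem.Dict.keys (PySem.Dict.mk recipe)).foldl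
        (fun result food =>
          if PySem.Dict.contains result food then
            PySem.Dict.modify result food 0 (· + PySem.Dict.getD (PySem.Dict.mk recipe) food 0)
          else
            PySem.Dict.insert result food (PySem.Dict.getD (PySem.Dict.mk recipe) food 0))
        result)
    PySem.Dict.empty).items

def combine_recipes_recur : List (List (List (String × Int))) → List (List (String × Int))
  | [] => []
  | r0 :: rest =>
    if rest = [] then r0
    else
      let rest_recipes := combine_recipes_recur rest
      r0.foldl (fun result recipe =>
        rest_recipes.foldl (fun result combo => result ++ [add_recipes [recipe, combo]]) result) []

def combine_recipes (nested_recipes : List (List (List (String × Int)))) : List (List (String × Int)) :=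
  combine_recipes_recur nested_recipes

-- ===== PORT B =====
-- port of Source B's _merge: result = dict(d1); for food, qty in d2.items(): result[food] = result.get(food, 0) + qty
def merge_recipes (d1 d2 : List (String × Int)) : List (String × Int) :=
  (d2.foldl (fun r p => PySem.Dict.insert r p.1 (PySem.Dict.getD r p.1 0 + p.2)) (PySem.Dict.mk d1)).items

def combine_recipes_alt (nested_recipes : List (List (List (String × Int)))) : List (List (String × Int)) :=
  match nested_recipes with
  | [] => []
  | g0 :: rest =>
    rest.foldl (fun combos group => combos.flatMap (fun c => group.map (fun d => merge_recipes c d))) g0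

-- ===== PRECONDITION & SPEC =====
-- Every recipe is a Python dict, whose key list never contains duplicates; Pre_ states exactly that
-- (association lists with a repeated key encode no Python dict, so A is never run on them).
def Pre_combine_recipes (nested_recipes : List (List (List (String × Int)))) : Prop :=
  ∀ g ∈ nested_recipes, ∀ d ∈ g, (d.map Prod.fst).Nodup

instance (nested_recipes : List (List (List (String × Int)))) : Decidable (Pre_combine_recipes nested_recipes) := by
  unfold Pre_combine_recipes; infer_instance

def pvWitness_combine_recipes : (List (List (List (String × Int)))) :=
  [[[("milk", 1), ("chocolate", 1)], [("sugar", 1)]], [[("milk", 2)]]]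

def Spec_combine_recipes (nested_recipes : List (List (List (String × Int)))) (out : List (List (String × Int))) : Prop := out = combine_recipes_alt nested_recipes
instance (nested_recipes : List (List (List (String × Int)))) (out : List (List (String × Int))) : Decidable (Spec_combine_recipes nested_recipes out) := by unfold Spec_combine_recipes; infer_instance

-- ===== CLAIM (what is proved, stated in full; the proofs are below) =====
def Claim_equal_combine_recipes : Prop := ∀ (nested_recipes : List (List (List (String × Int)))), Dom_combine_recipes nested_recipes → Pre_combine_recipes nested_recipes → Spec_combine_recipes nested_recipes (combine_recipes nested_recipes)

-- ===== LEMMAS AND PROOFS =====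

-- the two-dict merge at Dict level (B's loop; A's keys-loop is reduced to it below)
def mrgD (d1 d2 : PySem.Dict String Int) : PySem.Dict String Int :=
  d2.items.foldl (fun r p => PySem.Dict.insert r p.1 (PySem.Dict.getD r p.1 0 + p.2)) d1

lemma merge_recipes_eq_mrgD (d1 d2 : List (String × Int)) :
    merge_recipes d1 d2 = (mrgD (PySem.Dict.mk d1) (PySem.Dict.mk d2)).items := rfl

lemma getD_mk_cons (k x : String) (v : Int) (t : List (String × Int)) :
    (PySem.Dict.mk ((k,v)::t)).getD x 0 = if k == x then v else (PySem.Dict.mk t).getD x 0 := by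
  rw [PySem.Dict.getD_eq_get?_getD, PySem.Dict.get?_mk_cons]
  split <;> simp [PySem.Dict.getD_eq_get?_getD]

lemma contains_mk_eq_false {t : List (String × Int)} {x : String} (h : x ∉ t.map Prod.fst) :
    (PySem.Dict.mk t).contains x = false := by
  rw [PySem.Dict.contains_eq_decide_mem_keys]; exact decide_eq_false h

lemma contains_mk_cons (k0 x : String) (v0 : Int) (t : List (String × Int)) :
    (PySem.Dict.mk ((k0,v0)::t)).contains x = (k0 == x || (PySem.Dict.mk t).contains x) := by
  simp [PySem.Dict.contains_mk]

lemma getD_mk_nil (k : String) : (PySem.Dict.mk ([] : List (String × Int))).getD k 0 = 0 := rfl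

lemma contains_fold (l : List (String × Int)) (d1 : PySem.Dict String Int) (k : String) :
    (l.foldl (fun r p => PySem.Dict.insert r p.1 (PySem.Dict.getD r p.1 0 + p.2)) d1).contains k
      = (d1.contains k || (PySem.Dict.mk l).contains k) := by
  induction l generalizing d1 with
  | nil => simp
  | cons p t ih =>
    obtain ⟨k0, v0⟩ := p
    rw [List.foldl_cons, ih, PySem.Dict.contains_insert, contains_mk_cons]
    by_cases h : k = k0
    · subst h; simp
    · have b1 : (k == k0) = false := by simpa using h
      have b2 : (k0 == k) = false := by
        simp only [beq_eq_false_iff_ne]; exact fun hh => h hh.symm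
      simp [b1, b2]

lemma getD_fold (l : List (String × Int)) (hl : (l.map Prod.fst).Nodup)
    (d1 : PySem.Dict String Int) (k : String) :
    (l.foldl (fun r p => PySem.Dict.insert r p.1 (PySem.Dict.getD r p.1 0 + p.2)) d1).getD k 0
      = d1.getD k 0 + (PySem.Dict.mk l).getD k 0 := by
  induction l generalizing d1 with
  | nil => simp [getD_mk_nil]
  | cons p t ih =>
    obtain ⟨k0, v0⟩ := p
    rw [List.map_cons, List.nodup_cons] at hl
    obtain ⟨hk, ht⟩ := hl
    rw [List.foldl_cons, ih ht, getD_mk_cons, PySem.Dict.getD_insert]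
    by_cases h : k = k0
    · subst h
      rw [if_pos rfl, if_pos (beq_self_eq_true _),
        PySem.Dict.getD_of_not_contains _ 0 (contains_mk_eq_false hk)]
      ring
    · have hb : (k0 == k) = false := by
        simp only [beq_eq_false_iff_ne]; exact fun hh => h hh.symm
      rw [if_neg h, if_neg (by simp [hb])]

lemma fold_items (l : List (String × Int)) (hl : (l.map Prod.fst).Nodup)
    (d1 : PySem.Dict String Int) (h1 : d1.keys.Nodup) :
    (l.foldl (fun r p => PySem.Dict.insert r p.1 (PySem.Dict.getD r p.1 0 + p.2)) d1).items
      = d1.items.map (fun p => (p.1, p.2 + (PySem.Dict.mk l).getD p.1 0))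
        ++ l.filter (fun p => !(d1.contains p.1)) := by
  induction l generalizing d1 with
  | nil =>
    simp only [List.foldl_nil, List.filter_nil, List.append_nil]
    exact (List.map_id'' (fun p => by simp [getD_mk_nil]) d1.items).symm
  | cons p t ih =>
    obtain ⟨k, v⟩ := p
    rw [List.map_cons, List.nodup_cons] at hl
    obtain ⟨hk, ht⟩ := hl
    have h0t : (PySem.Dict.mk t).getD k 0 = 0 :=
      PySem.Dict.getD_of_not_contains _ 0 (contains_mk_eq_false hk)
    have hins : ∀ (w : Int), ∀ x ∈ t, (d1.insert k w).contains x.1 = d1.contains x.1 := by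
      intro w x hx
      have hxm : x.1 ∈ t.map Prod.fst := List.mem_map.mpr ⟨x, hx, rfl⟩
      have hxk : (x.1 == k) = false := by
        simp only [beq_eq_false_iff_ne]
        exact fun hh => hk (hh ▸ hxm)
      rw [PySem.Dict.contains_insert, hxk, Bool.false_or]
    rw [List.foldl_cons, ih ht _ (PySem.Dict.nodup_keys_insert d1 k _ h1)]
    by_cases hc : d1.contains k = true
    · rw [PySem.Dict.items_insert_of_contains d1 _ hc, List.map_map]
      congr 1
      · apply List.map_congr_left
        intro q hq
        by_cases hqk : q.1 = k
        · have hval : d1.getD k 0 = q.2 := by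
            have hm : (k, q.2) ∈ d1.items := by rw [← hqk]; exact hq
            exact PySem.Dict.getD_of_mem_items d1 hm h1 0
          have hb : (q.1 == k) = true := by simp [hqk]
          have hb' : (k == q.1) = true := by simp [hqk]
          simp only [Function.comp_apply, getD_mk_cons, h0t, hval, hqk]
          simp [h0t]
        · have hb : (q.1 == k) = false := by simpa using hqk
          have hb' : (k == q.1) = false := by
            simp only [beq_eq_false_iff_ne]; exact fun hh => hqk hh.symm
          simp only [Function.comp_apply, hb, getD_mk_cons, hb', Bool.false_eq_true, if_false]
      · rw [List.filter_cons]
        rw [if_neg (by simp [hc])]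
        apply List.filter_congr
        intro x hx
        rw [hins _ x hx]
    · have hc' : d1.contains k = false := by simpa using hc
      rw [PySem.Dict.items_insert_of_not_contains d1 _ hc',
        PySem.Dict.getD_of_not_contains d1 0 hc', List.map_append, List.filter_cons]
      rw [if_pos (by simp [hc'])]
      rw [List.append_assoc]
      congr 1
      · apply List.map_congr_left
        intro q hq
        have hb' : (k == q.1) = false := by
          simp only [beq_eq_false_iff_ne]
          intro hh
          have hqm : q.1 ∈ d1.items.map Prod.fst := List.mem_map.mpr ⟨q, hq, rfl⟩
          have hck : d1.contains k = true := by
            rw [PySem.Dict.contains_eq_decide_mem_keys]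
            exact decide_eq_true (hh ▸ hqm)
          rw [hck] at hc'; exact Bool.true_eq_false.mp hc'
        rw [getD_mk_cons, if_neg (by simp [hb'])]
      · simp only [List.map_cons, List.map_nil, h0t]
        rw [show (0 : Int) + v + 0 = v by ring, List.singleton_append]
        congr 1
        apply List.filter_congr
        intro x hx
        rw [hins _ x hx]

-- specializations to mrgD
lemma mrgD_items (d1 d2 : PySem.Dict String Int) (h1 : d1.keys.Nodup) (h2 : d2.keys.Nodup) :
    (mrgD d1 d2).items
      = d1.items.map (fun p => (p.1, p.2 + d2.getD p.1 0))
        ++ d2.items.filter (fun p => !(d1.contains p.1)) :=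
  fold_items d2.items h2 d1 h1

lemma mrgD_getD (d1 d2 : PySem.Dict String Int) (h2 : d2.keys.Nodup) (k : String) :
    (mrgD d1 d2).getD k 0 = d1.getD k 0 + d2.getD k 0 :=
  getD_fold d2.items h2 d1 k

lemma mrgD_contains (d1 d2 : PySem.Dict String Int) (k : String) :
    (mrgD d1 d2).contains k = (d1.contains k || d2.contains k) :=
  contains_fold d2.items d1 k

lemma mrgD_nodup (d1 d2 : PySem.Dict String Int) (h1 : d1.keys.Nodup) :
    (mrgD d1 d2).keys.Nodup :=
  PySem.Dict.nodup_keys_foldl_insert_key d2.items Prod.fst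
    (fun r p => PySem.Dict.getD r p.1 0 + p.2) d1 h1

lemma mrgD_empty (d : PySem.Dict String Int) (h : d.keys.Nodup) :
    mrgD PySem.Dict.empty d = d := by
  apply PySem.Dict.ext
  rw [mrgD_items PySem.Dict.empty d (by simp) h]
  simp [show (PySem.Dict.empty : PySem.Dict String Int).items = [] from rfl,
    show ∀ k : String, (PySem.Dict.empty : PySem.Dict String Int).contains k = false from
      fun k => by simp]

lemma mrgD_assoc (a b c : PySem.Dict String Int)
    (ha : a.keys.Nodup) (hb : b.keys.Nodup) (hc : c.keys.Nodup) :
    mrgD (mrgD a b) c = mrgD a (mrgD b c) := by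
  have e1 : (a.items.map (fun p => (p.1, p.2 + b.getD p.1 0))).map
        (fun p => (p.1, p.2 + c.getD p.1 0))
      = a.items.map (fun p => (p.1, p.2 + (mrgD b c).getD p.1 0)) := by
    rw [List.map_map]
    apply List.map_congr_left
    intro p _
    simp only [Function.comp_apply]
    rw [mrgD_getD b c hc, add_assoc]
  have e2 : ((b.items.filter (fun p => !a.contains p.1)).map
        (fun p => (p.1, p.2 + c.getD p.1 0)))
      = (b.items.map (fun p => (p.1, p.2 + c.getD p.1 0))).filter
          (fun p => !a.contains p.1) := by
    rw [List.filter_map]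
    exact congrArg _ (List.filter_congr fun x _ => rfl)
  have e3 : c.items.filter (fun p => !(mrgD a b).contains p.1)
      = (c.items.filter (fun p => !b.contains p.1)).filter (fun p => !a.contains p.1) := by
    rw [List.filter_filter]
    apply List.filter_congr
    intro p _
    rw [mrgD_contains]
    simp [Bool.not_or]
  apply PySem.Dict.ext
  rw [mrgD_items (mrgD a b) c (mrgD_nodup a b ha) hc,
      mrgD_items a b ha hb,
      mrgD_items a (mrgD b c) ha (mrgD_nodup b c hb),
      mrgD_items b c hb hc,
      List.map_append, e1, e3,
      List.filter_append, ← e2, List.append_assoc]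

-- A's inner keys-loop (with the 'if food in result' branch) equals B's pairs-loop
lemma stepA_gen (l : List (String × Int)) (e : PySem.Dict String Int)
    (hagree : ∀ p ∈ l, e.getD p.1 0 = p.2) (r : PySem.Dict String Int) :
    (l.map Prod.fst).foldl
      (fun result food =>
        if PySem.Dict.contains result food then
          PySem.Dict.modify result food 0 (· + PySem.Dict.getD e food 0)
        else
          PySem.Dict.insert result food (PySem.Dict.getD e food 0)) r
    = l.foldl (fun r p => PySem.Dict.insert r p.1 (PySem.Dict.getD r p.1 0 + p.2)) r := by
  induction l generalizing r with
  | nil => rfl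
  | cons p t ih =>
    simp only [List.map_cons, List.foldl_cons]
    have hv : e.getD p.1 0 = p.2 := hagree p (List.mem_cons_self ..)
    have hstep : (if PySem.Dict.contains r p.1 then
          PySem.Dict.modify r p.1 0 (· + PySem.Dict.getD e p.1 0)
        else PySem.Dict.insert r p.1 (PySem.Dict.getD e p.1 0))
        = PySem.Dict.insert r p.1 (PySem.Dict.getD r p.1 0 + p.2) := by
      by_cases h : r.contains p.1 = true
      · rw [if_pos h, hv]
        simp [PySem.Dict.modify]
      · rw [if_neg h, hv,
          PySem.Dict.getD_of_not_contains r 0 (by simpa using h), zero_add]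
    rw [hstep, ih (fun q hq => hagree q (List.mem_cons_of_mem _ hq))]

lemma add_recipes_pair (x y : List (String × Int))
    (hx : (x.map Prod.fst).Nodup) (hy : (y.map Prod.fst).Nodup) :
    add_recipes [x, y] = merge_recipes x y := by
  have hag : ∀ z : List (String × Int), (z.map Prod.fst).Nodup →
      ∀ p ∈ z, (PySem.Dict.mk z).getD p.1 0 = p.2 := by
    intro z hz p hp
    exact PySem.Dict.getD_of_mem_items (PySem.Dict.mk z) hp hz 0
  show (List.foldl _ PySem.Dict.empty [x, y]).items = _
  simp only [List.foldl_cons, List.foldl_nil]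
  rw [show (PySem.Dict.keys (PySem.Dict.mk x)) = x.map Prod.fst from rfl,
      show (PySem.Dict.keys (PySem.Dict.mk y)) = y.map Prod.fst from rfl,
      stepA_gen x (PySem.Dict.mk x) (hag x hx), stepA_gen y (PySem.Dict.mk y) (hag y hy)]
  show (mrgD (mrgD PySem.Dict.empty (PySem.Dict.mk x)) (PySem.Dict.mk y)).items = _
  rw [mrgD_empty (PySem.Dict.mk x) hx, merge_recipes_eq_mrgD]

lemma merge_nodup (x y : List (String × Int)) (hx : (x.map Prod.fst).Nodup) :
    ((merge_recipes x y).map Prod.fst).Nodup := by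
  rw [merge_recipes_eq_mrgD]
  exact mrgD_nodup (PySem.Dict.mk x) (PySem.Dict.mk y) hx

lemma merge_assoc (c d r : List (String × Int))
    (hc : (c.map Prod.fst).Nodup) (hd : (d.map Prod.fst).Nodup) (hr : (r.map Prod.fst).Nodup) :
    merge_recipes (merge_recipes c d) r = merge_recipes c (merge_recipes d r) := by
  simp only [merge_recipes_eq_mrgD]
  show (mrgD (mrgD (PySem.Dict.mk c) (PySem.Dict.mk d)) (PySem.Dict.mk r)).items
      = (mrgD (PySem.Dict.mk c) (mrgD (PySem.Dict.mk d) (PySem.Dict.mk r))).items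
  rw [mrgD_assoc (PySem.Dict.mk c) (PySem.Dict.mk d) (PySem.Dict.mk r) hc hd hr]

-- the canonical comprehension form both programs compute
def canonCombos : List (List (List (String × Int))) → List (List (String × Int))
  | [] => []
  | [g] => g
  | g :: gs => g.flatMap (fun d => (canonCombos gs).map (fun r => merge_recipes d r))

lemma canon_nodup (gs : List (List (List (String × Int))))
    (h : ∀ g ∈ gs, ∀ d ∈ g, (d.map Prod.fst).Nodup) :
    ∀ x ∈ canonCombos gs, (x.map Prod.fst).Nodup := by
  induction gs with
  | nil => intro x hx; simp [canonCombos] at hx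
  | cons g gs ih =>
    cases gs with
    | nil =>
      intro x hx
      exact h g (by simp) x (by simpa [canonCombos] using hx)
    | cons g1 gs1 =>
      intro x hx
      simp only [canonCombos, List.mem_flatMap, List.mem_map] at hx
      obtain ⟨d, hd, r, hr, rfl⟩ := hx
      exact merge_nodup d r (h g (by simp) d hd)

lemma foldl_append_singleton {α β : Type} (l : List α) (f : α → β) (acc : List β) :
    l.foldl (fun r x => r ++ [f x]) acc = acc ++ l.map f := by
  induction l generalizing acc with
  | nil => simp
  | cons x t ih => simp [ih]

lemma foldl_append_flatMap {α β : Type} (l : List α) (g : α → List β) (acc : List β) :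
    l.foldl (fun r x => r ++ g x) acc = acc ++ l.flatMap g := by
  induction l generalizing acc with
  | nil => simp
  | cons x t ih => simp [ih]

lemma recur_cons (g : List (List (String × Int))) (rest : List (List (List (String × Int))))
    (h : rest ≠ []) :
    combine_recipes_recur (g :: rest)
      = g.foldl (fun result recipe => (combine_recipes_recur rest).foldl
          (fun result combo => result ++ [add_recipes [recipe, combo]]) result) [] := by
  rw [combine_recipes_recur, if_neg h]

lemma recur_eq_canon (gs : List (List (List (String × Int)))) (hne : gs ≠ [])
    (h : ∀ g ∈ gs, ∀ d ∈ g, (d.map Prod.fst).Nodup) :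
    combine_recipes_recur gs = canonCombos gs := by
  induction gs with
  | nil => exact absurd rfl hne
  | cons g gs ih =>
    cases gs with
    | nil => simp [combine_recipes_recur, canonCombos]
    | cons g1 gs1 =>
      have hrest : ∀ g' ∈ g1 :: gs1, ∀ d ∈ g', (d.map Prod.fst).Nodup := by
        intro g' hg' d hd; exact h g' (List.mem_cons_of_mem _ hg') d hd
      rw [recur_cons g (g1 :: gs1) (List.cons_ne_nil g1 gs1),
        ih (List.cons_ne_nil g1 gs1) hrest]
      have hbody : g.foldl (fun result recipe => (canonCombos (g1 :: gs1)).foldl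
            (fun result combo => result ++ [add_recipes [recipe, combo]]) result) []
          = g.flatMap (fun recipe => (canonCombos (g1 :: gs1)).map
              (fun combo => add_recipes [recipe, combo])) := by
        calc g.foldl (fun result recipe => (canonCombos (g1 :: gs1)).foldl
              (fun result combo => result ++ [add_recipes [recipe, combo]]) result) []
            = g.foldl (fun result recipe => result ++ (canonCombos (g1 :: gs1)).map
                (fun combo => add_recipes [recipe, combo])) [] := by
              have hfun : (fun (result : List (List (String × Int))) recipe =>
                    (canonCombos (g1 :: gs1)).foldl
                      (fun result combo => result ++ [add_recipes [recipe, combo]]) result)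
                  = fun result recipe => result ++ (canonCombos (g1 :: gs1)).map
                      (fun combo => add_recipes [recipe, combo]) :=
                funext fun acc => funext fun recipe => foldl_append_singleton _ _ acc
              rw [hfun]
          _ = _ := by rw [foldl_append_flatMap]; simp
      rw [hbody]
      show _ = g.flatMap (fun d => (canonCombos (g1 :: gs1)).map (fun r => merge_recipes d r))
      apply List.flatMap_congr
      intro recipe hrec
      apply List.map_congr_left
      intro combo hcombo
      exact add_recipes_pair recipe combo (h g (by simp) recipe hrec)
        (canon_nodup (g1 :: gs1) hrest combo hcombo)

lemma alt_fold (gs : List (List (List (String × Int)))) (hne : gs ≠ [])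
    (hg : ∀ g ∈ gs, ∀ d ∈ g, (d.map Prod.fst).Nodup) :
    ∀ cs : List (List (String × Int)), (∀ c ∈ cs, (c.map Prod.fst).Nodup) →
    gs.foldl (fun combos group => combos.flatMap (fun c => group.map (fun d => merge_recipes c d))) cs
      = cs.flatMap (fun c => (canonCombos gs).map (fun r => merge_recipes c r)) := by
  induction gs with
  | nil => exact absurd rfl hne
  | cons g gs ih =>
    intro cs hcs
    cases gs with
    | nil => simp [canonCombos]
    | cons g1 gs1 =>
      have hrest : ∀ g' ∈ g1 :: gs1, ∀ d ∈ g', (d.map Prod.fst).Nodup :=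
        fun g' hg' d hd => hg g' (List.mem_cons_of_mem _ hg') d hd
      have hcs' : ∀ c ∈ cs.flatMap (fun c => g.map (fun d => merge_recipes c d)),
          (c.map Prod.fst).Nodup := by
        intro x hx
        simp only [List.mem_flatMap, List.mem_map] at hx
        obtain ⟨c, hc, d, hd, rfl⟩ := hx
        exact merge_nodup c d (hcs c hc)
      rw [List.foldl_cons, ih (List.cons_ne_nil g1 gs1) hrest _ hcs', List.flatMap_assoc]
      show _ = cs.flatMap (fun c =>
        (g.flatMap (fun d => (canonCombos (g1 :: gs1)).map (fun r => merge_recipes d r))).map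
          (fun r => merge_recipes c r))
      apply List.flatMap_congr
      intro c hc
      rw [List.flatMap_map, List.map_flatMap]
      apply List.flatMap_congr
      intro d hd
      rw [List.map_map]
      apply List.map_congr_left
      intro r hr
      exact merge_assoc c d r (hcs c hc) (hg g (by simp) d hd)
        (canon_nodup (g1 :: gs1) hrest r hr)

-- ===== VERDICT (by name: the statement is the Claim_ definition above) =====
theorem combine_recipes_spec : Claim_equal_combine_recipes := by
  intro nr _hdom hpre
  show combine_recipes nr = combine_recipes_alt nr
  cases nr with
  | nil => rfl
  | cons g0 rest =>
    cases rest with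
    | nil => simp [combine_recipes, combine_recipes_recur, combine_recipes_alt]
    | cons g1 gs1 =>
      have hrest : ∀ g' ∈ g1 :: gs1, ∀ d ∈ g', (d.map Prod.fst).Nodup :=
        fun g' hg' d hd => hpre g' (List.mem_cons_of_mem _ hg') d hd
      show combine_recipes_recur (g0 :: g1 :: gs1) = _
      rw [recur_eq_canon (g0 :: g1 :: gs1) (List.cons_ne_nil _ _) hpre]
      show canonCombos (g0 :: g1 :: gs1)
          = (g1 :: gs1).foldl
              (fun combos group => combos.flatMap (fun c => group.map (fun d => merge_recipes c d))) g0
      rw [alt_fold (g1 :: gs1) (List.cons_ne_nil g1 gs1) hrest g0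
        (fun c hc => hpre g0 (by simp) c hc)]
      rfl
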